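-- pv_equiv track=rewrite | github.com/kayrugold/andyai | andyai.py | protected_memory_status_text
-- ===== SOURCE A (Python) =====
-- def protected_memory_status_text(state) -> str:
--     db = state.get("db", []) or []
--     counts = {}
--     protected = 0
--
--     for entry in db:
--         tags = entry.get("tags", []) or []
--         for tag in tags:
--             if str(tag).startswith("lane:"):
--                 counts[tag] = counts.get(tag, 0) + 1
--         if "protected" in tags:
--             protected += 1
--
--     lines = ["PROTECTED MEMORY STATUS", ""]
--     for k in sorted(counts):
--         lines.append(f"{k}: {counts[k]}")
--     lines.append("")
--     lines.append(f"Protected Entries: {protected}")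
--     return "\n".join(lines)
-- ===== SOURCE B (Python) =====
-- def protected_memory_status_text(state) -> str:
--     db = state.get("db", []) or []
--     occ = []
--     protected = 0
--     for entry in db:
--         tags = entry.get("tags", []) or []
--         occ.extend(t for t in tags if str(t).startswith("lane:"))
--         if "protected" in tags:
--             protected += 1
--     occ.sort()
--     lines = ["PROTECTED MEMORY STATUS", ""]
--     i, n = 0, len(occ)
--     while i < n:
--         j = i + 1
--         while j < n and occ[j] == occ[i]:
--             j += 1
--         lines.append(f"{occ[i]}: {j - i}")
--         i = j
--     lines.append("")
--     lines.append(f"Protected Entries: {protected}")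
--     return "\n".join(lines)
-- ===== Notes on version B (the rewrite author's own statement) =====
-- stated objective: alternative
-- what changed: B drops A's counting dict entirely: it collects all lane-tag occurrences into one flat list, sorts it, and emits one line per run of equal elements via a run-length index scan, replacing A's hash-count-then-sort-keys with sort-occurrences-then-group.
import Mathlib
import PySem

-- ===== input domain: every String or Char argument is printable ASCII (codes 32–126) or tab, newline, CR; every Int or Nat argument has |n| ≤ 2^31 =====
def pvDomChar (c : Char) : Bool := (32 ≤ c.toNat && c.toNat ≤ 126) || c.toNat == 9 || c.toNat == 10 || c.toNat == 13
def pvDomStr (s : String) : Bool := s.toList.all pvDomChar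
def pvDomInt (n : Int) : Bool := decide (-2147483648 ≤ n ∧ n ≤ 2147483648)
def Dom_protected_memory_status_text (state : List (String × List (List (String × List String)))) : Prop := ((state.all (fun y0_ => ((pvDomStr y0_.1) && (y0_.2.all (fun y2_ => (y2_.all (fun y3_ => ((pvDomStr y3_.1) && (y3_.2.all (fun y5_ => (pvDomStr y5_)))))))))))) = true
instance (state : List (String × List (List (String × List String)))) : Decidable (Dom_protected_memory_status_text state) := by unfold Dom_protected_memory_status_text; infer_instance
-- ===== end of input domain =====

-- B replaces A's hash-count-then-sort-keys by sort-all-occurrences-then-run-length-scan (alternative algorithm, same output).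


-- ===== PORT A =====
def protected_memory_status_text (state : List (String × List (List (String × List String)))) : String :=
  -- db = state.get("db", []) or []   ('or []' is the identity on list values)
  let db := ((PySem.Dict.mk state).get? "db").getD []
  -- the for-loop over db, threading (counts, protected)
  let acc := db.foldl (fun (acc : PySem.Dict String Int × Int) entry =>
    let tags := ((PySem.Dict.mk entry).get? "tags").getD []
    let counts := tags.foldl (fun c tag =>
      if PySem.Str.startswith tag "lane:" then c.insert tag (c.getD tag 0 + 1) else c) acc.1
    let protected_ := if tags.contains "protected" then acc.2 + 1 else acc.2
    (counts, protected_)) (PySem.Dict.empty, (0 : Int))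
  let counts := acc.1
  let protected_ := acc.2
  let lines := ["PROTECTED MEMORY STATUS", ""]
  -- for k in sorted(counts): lines.append(f"{k}: {counts[k]}")  (k is always a key, so counts[k] = getD counts k 0, exact)
  let lines := lines ++ (PySem.List.sorted counts.keys (fun k => k)).map
      (fun k => k ++ ": " ++ PySem.Int.toStr (counts.getD k 0))
  let lines := lines ++ ["", "Protected Entries: " ++ PySem.Int.toStr protected_]
  PySem.Str.join "\n" lines

-- ===== PORT B =====
-- the pair of while-loops of Source B: emit one line per run of equal elements of the (sorted) list
def pvRuns (l : List String) : List String :=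
  match l with
  | [] => []
  | k :: rest =>
      (k ++ ": " ++ PySem.Int.toStr ((1 : Int) + (rest.takeWhile (fun t => t == k)).length))
        :: pvRuns (rest.dropWhile (fun t => t == k))
termination_by l.length
decreasing_by
  exact Nat.lt_succ_of_le (List.length_dropWhile_le _ _)

def protected_memory_status_text_alt (state : List (String × List (List (String × List String)))) : String :=
  let db := ((PySem.Dict.mk state).get? "db").getD []
  -- the single pass: occ.extend(lane tags) and the protected counter
  let acc := db.foldl (fun (acc : List String × Int) entry =>
    let tags := ((PySem.Dict.mk entry).get? "tags").getD []
    let occ := acc.1 ++ tags.filter (fun t => PySem.Str.startswith t "lane:")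
    let protected_ := if tags.contains "protected" then acc.2 + 1 else acc.2
    (occ, protected_)) ([], (0 : Int))
  -- occ.sort()
  let occ := PySem.List.sorted acc.1 (fun k => k)
  -- the run-length scan over the sorted occurrence list
  let lines := ["PROTECTED MEMORY STATUS", ""] ++ pvRuns occ
      ++ ["", "Protected Entries: " ++ PySem.Int.toStr acc.2]
  PySem.Str.join "\n" lines

-- ===== PRECONDITION & SPEC =====
def Spec_protected_memory_status_text (state : List (String × List (List (String × List String)))) (out : String) : Prop := out = protected_memory_status_text_alt state
instance (state : List (String × List (List (String × List String)))) (out : String) : Decidable (Spec_protected_memory_status_text state out) := by unfold Spec_protected_memory_status_text; infer_instance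

-- ===== CLAIM (what is proved, stated in full; the proofs are below) =====
def Claim_equal_protected_memory_status_text : Prop := ∀ (state : List (String × List (List (String × List String)))), Dom_protected_memory_status_text state → Spec_protected_memory_status_text state (protected_memory_status_text state)

-- ===== LEMMAS AND PROOFS =====

-- the heads of the runs of a list (first element of each maximal block of equal elements)
def pvHeads (l : List String) : List String :=
  match l with
  | [] => []
  | k :: rest => k :: pvHeads (rest.dropWhile (fun t => t == k))
termination_by l.length
decreasing_by
  exact Nat.lt_succ_of_le (List.length_dropWhile_le _ _)

-- an 'if p then f acc x else acc' loop is the fold of f over the filtered list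
theorem pv_foldl_if_filter {α β : Type} (p : α → Bool) (f : β → α → β) :
    ∀ (l : List α) (b : β),
      l.foldl (fun acc x => if p x then f acc x else acc) b = (l.filter p).foldl f b := by
  intro l
  induction l with
  | nil => intro b; rfl
  | cons x xs ih =>
      intro b
      by_cases h : p x = true
      · simp [h, ih]
      · simp [h, List.foldl_cons, ih]

-- A's single pass over db splits into the counter fold over the flat lane-tag list and the protected count
theorem pv_pair_fold (db : List (List (String × List String))) :
    ∀ (c : PySem.Dict String Int) (p : Int),
      db.foldl (fun (acc : PySem.Dict String Int × Int) entry =>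
          let tags := ((PySem.Dict.mk entry).get? "tags").getD []
          let counts := tags.foldl (fun c tag =>
            if PySem.Str.startswith tag "lane:" then c.insert tag (c.getD tag 0 + 1) else c) acc.1
          let protected_ := if tags.contains "protected" then acc.2 + 1 else acc.2
          (counts, protected_)) (c, p)
      = ((db.flatMap (fun entry =>
            (((PySem.Dict.mk entry).get? "tags").getD []).filter
              (fun t => PySem.Str.startswith t "lane:"))).foldl
            (fun c tag => c.insert tag (c.getD tag 0 + 1)) c,
         p + (db.countP (fun entry =>
            (((PySem.Dict.mk entry).get? "tags").getD []).contains "protected") : Nat)) := by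
  induction db with
  | nil => intro c p; simp
  | cons e rest ih =>
      intro c p
      simp only [List.foldl_cons]
      rw [ih]
      simp only [List.flatMap_cons, List.foldl_append, List.countP_cons, pv_foldl_if_filter]
      rw [Prod.mk.injEq]
      refine ⟨rfl, ?_⟩
      split_ifs <;> push_cast <;> omega

-- B's single pass over db is the flat lane-tag list plus the protected count
theorem pv_pair_fold_B (db : List (List (String × List String))) :
    ∀ (o : List String) (p : Int),
      db.foldl (fun (acc : List String × Int) entry =>
          let tags := ((PySem.Dict.mk entry).get? "tags").getD []
          let occ := acc.1 ++ tags.filter (fun t => PySem.Str.startswith t "lane:")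
          let protected_ := if tags.contains "protected" then acc.2 + 1 else acc.2
          (occ, protected_)) (o, p)
      = (o ++ db.flatMap (fun entry =>
            (((PySem.Dict.mk entry).get? "tags").getD []).filter
              (fun t => PySem.Str.startswith t "lane:")),
         p + (db.countP (fun entry =>
            (((PySem.Dict.mk entry).get? "tags").getD []).contains "protected") : Nat)) := by
  induction db with
  | nil => intro o p; simp
  | cons e rest ih =>
      intro o p
      simp only [List.foldl_cons]
      rw [ih]
      simp only [List.flatMap_cons, List.countP_cons, List.append_assoc]
      rw [Prod.mk.injEq]
      refine ⟨rfl, ?_⟩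
      split_ifs <;> push_cast <;> omega

-- in a ≤-sorted list k :: rest, everything dropped past the first run is strictly above k
theorem pv_drop_gt (k : String) (rest : List String)
    (hp : (k :: rest).Pairwise (· ≤ ·)) :
    ∀ y ∈ rest.dropWhile (fun t => t == k), k < y := by
  induction rest with
  | nil => simp
  | cons x xs ih =>
      rcases List.pairwise_cons.mp hp with ⟨h1, h2⟩
      rcases List.pairwise_cons.mp h2 with ⟨h3, h4⟩
      by_cases hx : x = k
      · subst hx
        simp only [List.dropWhile_cons, BEq.rfl]
        exact ih (List.pairwise_cons.mpr ⟨fun y hy => h1 y (List.mem_cons_of_mem _ hy), h4⟩)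
      · have hne : (x == k) = false := beq_false_of_ne hx
        simp only [List.dropWhile_cons, hne]
        intro y hy
        have hkx : k < x := lt_of_le_of_ne (h1 x (List.mem_cons_self)) (Ne.symm hx)
        rcases List.mem_cons.mp hy with rfl | hy'
        · exact hkx
        · exact lt_of_lt_of_le hkx (h3 y hy')

-- membership of the run heads
theorem pv_heads_mem (l : List String) (hp : l.Pairwise (· ≤ ·)) :
    ∀ x, x ∈ pvHeads l ↔ x ∈ l := by
  induction l using pvHeads.induct with
  | case1 => simp [pvHeads]
  | case2 k rest ih =>
      have hrest : rest.Pairwise (· ≤ ·) := (List.pairwise_cons.mp hp).2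
      have hd : (rest.dropWhile (fun t => t == k)).Pairwise (· ≤ ·) :=
        hrest.sublist (List.dropWhile_sublist _)
      intro x
      rw [pvHeads]
      simp only [List.mem_cons, ih hd x]
      constructor
      · rintro (rfl | hx)
        · exact Or.inl rfl
        · exact Or.inr ((List.dropWhile_sublist _).mem hx)
      · rintro (rfl | hx)
        · exact Or.inl rfl
        · rw [← List.takeWhile_append_dropWhile (p := fun t => t == k) (l := rest)] at hx
          rcases List.mem_append.mp hx with hx | hx
          · exact Or.inl (by simpa using (List.mem_takeWhile_imp hx))
          · exact Or.inr hx

-- the run heads of a ≤-sorted list are strictly increasing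
theorem pv_heads_pairwise_lt (l : List String) (hp : l.Pairwise (· ≤ ·)) :
    (pvHeads l).Pairwise (· < ·) := by
  induction l using pvHeads.induct with
  | case1 => simp [pvHeads]
  | case2 k rest ih =>
      have hrest : rest.Pairwise (· ≤ ·) := (List.pairwise_cons.mp hp).2
      have hd : (rest.dropWhile (fun t => t == k)).Pairwise (· ≤ ·) :=
        hrest.sublist (List.dropWhile_sublist _)
      rw [pvHeads]
      refine List.pairwise_cons.mpr ⟨fun y hy => ?_, ih hd⟩
      exact pv_drop_gt k rest hp y ((pv_heads_mem _ hd y).mp hy)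

-- the run-length scan is the count map over the run heads
theorem pv_runs_eq (l : List String) (hp : l.Pairwise (· ≤ ·)) :
    pvRuns l = (pvHeads l).map (fun k => k ++ ": " ++ PySem.Int.toStr ((l.count k : Nat) : Int)) := by
  induction l using pvHeads.induct with
  | case1 => simp [pvRuns, pvHeads]
  | case2 k rest ih =>
      have hrest : rest.Pairwise (· ≤ ·) := (List.pairwise_cons.mp hp).2
      have hd : (rest.dropWhile (fun t => t == k)).Pairwise (· ≤ ·) :=
        hrest.sublist (List.dropWhile_sublist _)
      have hgt := pv_drop_gt k rest hp
      rw [pvRuns, pvHeads, List.map_cons, ih hd]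
      have htw : ∀ x ∈ rest.takeWhile (fun t => t == k), x = k := by
        intro x hx; simpa using List.mem_takeWhile_imp hx
      have hsplit : rest.count k = (rest.takeWhile (fun t => t == k)).length := by
        conv_lhs => rw [← List.takeWhile_append_dropWhile (p := fun t => t == k) (l := rest)]
        rw [List.count_append]
        have h1 : (rest.takeWhile (fun t => t == k)).count k
            = (rest.takeWhile (fun t => t == k)).length :=
          List.count_eq_length.mpr (fun x hx => by simpa using (htw x hx).symm)
        have h2 : (rest.dropWhile (fun t => t == k)).count k = 0 :=
          List.count_eq_zero.mpr (fun h => lt_irrefl k (hgt k h))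
        omega
      congr 1
      · -- head line: 1 + |takeWhile| = count k (k :: rest)
        have harg : ((1 : Int) + ((rest.takeWhile (fun t => t == k)).length : Int))
            = (((k :: rest).count k : Nat) : Int) := by
          rw [List.count_cons_self, hsplit]; push_cast; ring
        rw [harg]
      · -- tail: counts in l restrict to counts in the dropped suffix
        apply List.map_congr_left
        intro x hx
        have hxd : x ∈ rest.dropWhile (fun t => t == k) := (pv_heads_mem _ hd x).mp hx
        have hxk : k < x := pv_drop_gt k rest hp x hxd
        have hxne : (k == x) = false := beq_false_of_ne (fun h => lt_irrefl k (h ▸ hxk))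
        have hcnt : (k :: rest).count x = (rest.dropWhile (fun t => t == k)).count x := by
          rw [List.count_cons, hxne]
          simp only [Bool.false_eq_true, if_false, add_zero]
          conv_lhs => rw [← List.takeWhile_append_dropWhile (p := fun t => t == k) (l := rest)]
          rw [List.count_append]
          have : (rest.takeWhile (fun t => t == k)).count x = 0 :=
            List.count_eq_zero.mpr (fun h => by
              have := htw x h
              exact lt_irrefl k (by rw [this] at hxk; exact hxk))
          omega
        rw [hcnt]

-- sorted(set(xs)) is exactly the run heads of sorted(xs)
theorem pv_sorted_set_eq_heads (occ : List String) :
    PySem.List.sorted (PySem.Set.ofList occ) (fun k => k)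
      = pvHeads (PySem.List.sorted occ (fun k => k)) := by
  have hs : (PySem.List.sorted occ (fun k => k)).Pairwise (· ≤ ·) := by
    simpa using PySem.List.sorted_pairwise occ (fun k => k)
  apply PySem.List.sorted_eq_of_perm_of_pairwise_lt
  · rw [List.perm_ext_iff_of_nodup]
    · intro a
      rw [pv_heads_mem _ hs a, PySem.List.mem_sorted]
      exact (PySem.Set.mem_ofList occ a).symm
    · exact ((pv_heads_pairwise_lt _ hs).imp ne_of_lt)
    · exact PySem.Set.nodup_ofList occ
  · simpa using pv_heads_pairwise_lt _ hs

-- the whole report body: A's sorted-keys count map equals B's run-length scan of the sorted occurrences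
theorem pv_body (occ : List String) :
    (PySem.List.sorted (PySem.Set.ofList occ) (fun k => k)).map
        (fun k => k ++ ": " ++ PySem.Int.toStr ((occ.count k : Nat) : Int))
      = pvRuns (PySem.List.sorted occ (fun k => k)) := by
  have hs : (PySem.List.sorted occ (fun k => k)).Pairwise (· ≤ ·) := by
    simpa using PySem.List.sorted_pairwise occ (fun k => k)
  rw [pv_sorted_set_eq_heads, pv_runs_eq _ hs]
  apply List.map_congr_left
  intro k hk
  rw [(PySem.List.sorted_perm occ (fun k => k) false).count_eq k]

-- ===== VERDICT (by name: the statement is the Claim_ definition above) =====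
theorem protected_memory_status_text_spec : Claim_equal_protected_memory_status_text := by
  intro state _
  unfold Spec_protected_memory_status_text
  unfold protected_memory_status_text protected_memory_status_text_alt
  simp only [pv_pair_fold, pv_pair_fold_B, PySem.Dict.foldl_insert_getD_add_one_eq_counter,
    PySem.Dict.keys_counter, PySem.Dict.getD_counter, zero_add, List.nil_append, pv_body]
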